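-- pv_equiv track=rewrite | github.com/bananapowerchicken/leetcode_algo | 219_contains_duplicate_2.py | get_deltas
-- ===== SOURCE A (Python) =====
-- def get_deltas(indicies_list, k):
--     for i in range(len(indicies_list)):
--         j = i + 1
--         while j < len(indicies_list):
--             if abs(indicies_list[i] - indicies_list[j]) <= k:
--                 return True
--             j += 1
--
--     return False
-- ===== SOURCE B (Python) =====
-- def get_deltas(indicies_list, k):
--     s = sorted(indicies_list)
--     for a, b in zip(s, s[1:]):
--         if b - a <= k:
--             return True
--     return False
-- ===== Notes on version B (the rewrite author's own statement) =====
-- stated objective: alternative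
-- what changed: Replaces the nested all-pairs scan with sort-then-adjacent-scan (a pair within distance k exists iff some adjacent pair of the sorted list is within k); better worst case, but A's early exit wins on random inputs.
import Mathlib
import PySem

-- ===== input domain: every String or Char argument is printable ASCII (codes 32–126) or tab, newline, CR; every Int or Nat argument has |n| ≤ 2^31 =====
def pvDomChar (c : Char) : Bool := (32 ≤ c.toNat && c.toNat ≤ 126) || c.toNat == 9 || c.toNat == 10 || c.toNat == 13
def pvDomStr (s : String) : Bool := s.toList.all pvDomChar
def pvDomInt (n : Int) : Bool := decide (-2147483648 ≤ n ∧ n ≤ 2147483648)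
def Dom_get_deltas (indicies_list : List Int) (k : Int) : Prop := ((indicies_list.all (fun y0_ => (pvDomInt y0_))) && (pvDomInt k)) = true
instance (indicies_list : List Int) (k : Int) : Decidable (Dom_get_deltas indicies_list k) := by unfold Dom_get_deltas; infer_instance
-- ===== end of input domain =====

-- B replaces A's nested all-pairs scan by sort + one adjacent-difference scan (a genuinely different algorithm with a better worst case; not measured faster on random inputs).


-- ===== PORT A =====
-- inner 'while j < len: if abs(xs[i]-xs[j]) <= k: return True; j += 1'
def get_deltas_inner (xs : List Int) (k xi : Int) (j : Nat) : Bool :=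
  if h : j < xs.length then
    if |xi - xs[j]| ≤ k then true else get_deltas_inner xs k xi (j+1)
  else false
termination_by xs.length - j

-- outer 'for i in range(len(xs))' with early return
def get_deltas_outer (xs : List Int) (k : Int) (i : Nat) : Bool :=
  if h : i < xs.length then
    if get_deltas_inner xs k xs[i] (i+1) then true else get_deltas_outer xs k (i+1)
  else false
termination_by xs.length - i

def get_deltas (indicies_list : List Int) (k : Int) : Bool :=
  get_deltas_outer indicies_list k 0

-- ===== PORT B =====
-- 'for a, b in zip(s, s[1:]): if b - a <= k: return True'
def get_deltas_adj (k : Int) : List Int → Bool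
  | a :: b :: t => if b - a ≤ k then true else get_deltas_adj k (b :: t)
  | _ => false

def get_deltas_alt (indicies_list : List Int) (k : Int) : Bool :=
  get_deltas_adj k (PySem.List.sorted indicies_list (fun x => x) false)

-- ===== PRECONDITION & SPEC =====
def Spec_get_deltas (indicies_list : List Int) (k : Int) (out : Bool) : Prop := out = get_deltas_alt indicies_list k
instance (indicies_list : List Int) (k : Int) (out : Bool) : Decidable (Spec_get_deltas indicies_list k out) := by unfold Spec_get_deltas; infer_instance

-- ===== CLAIM (what is proved, stated in full; the proofs are below) =====
def Claim_equal_get_deltas : Prop := ∀ (indicies_list : List Int) (k : Int), Dom_get_deltas indicies_list k → Spec_get_deltas indicies_list k (get_deltas indicies_list k)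

-- ===== LEMMAS AND PROOFS =====

-- index-pair predicate: some pair p < q with |xs[p] - xs[q]| ≤ k
def HasClosePair (xs : List Int) (k : Int) : Prop :=
  ∃ p q : Nat, ∃ hpq : p < q, ∃ hq : q < xs.length, |xs[p]'(Nat.lt_trans hpq hq) - xs[q]| ≤ k

lemma inner_spec (xs : List Int) (k xi : Int) (j : Nat) :
    get_deltas_inner xs k xi j = true ↔
      ∃ q : Nat, j ≤ q ∧ ∃ hq : q < xs.length, |xi - xs[q]| ≤ k := by
  fun_induction get_deltas_inner xs k xi j with
  | case1 j h hle =>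
    simp only [true_iff]
    exact ⟨j, le_refl j, h, hle⟩
  | case2 j h hgt ih =>
    rw [ih]
    constructor
    · rintro ⟨q, hq1, hq2, hq3⟩
      exact ⟨q, Nat.le_of_succ_le hq1, hq2, hq3⟩
    · rintro ⟨q, hq1, hq2, hq3⟩
      rcases Nat.eq_or_lt_of_le hq1 with rfl | hlt
      · exact absurd hq3 hgt
      · exact ⟨q, hlt, hq2, hq3⟩
  | case3 j h =>
    refine iff_of_false (by simp) ?_
    rintro ⟨q, hq1, hq2, _⟩
    exact h (Nat.lt_of_le_of_lt hq1 hq2)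

lemma outer_spec (xs : List Int) (k : Int) (i : Nat) :
    get_deltas_outer xs k i = true ↔
      ∃ p q : Nat, i ≤ p ∧ ∃ hpq : p < q, ∃ hq : q < xs.length, |xs[p]'(Nat.lt_trans hpq hq) - xs[q]| ≤ k := by
  fun_induction get_deltas_outer xs k i with
  | case1 i h hin =>
    refine iff_of_true rfl ?_
    obtain ⟨q, hq1, hq2, hq3⟩ := (inner_spec xs k xs[i] (i+1)).mp hin
    exact ⟨i, q, le_refl i, hq1, hq2, hq3⟩
  | case2 i h hnin ih =>
    rw [ih]
    constructor
    · rintro ⟨p, q, hp, hpq, hq, h3⟩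
      exact ⟨p, q, Nat.le_of_succ_le hp, hpq, hq, h3⟩
    · rintro ⟨p, q, hp, hpq, hq, h3⟩
      rcases Nat.eq_or_lt_of_le hp with heq | hlt
      · subst heq
        exact absurd ((inner_spec xs k _ _).mpr ⟨q, hpq, hq, h3⟩) hnin
      · exact ⟨p, q, hlt, hpq, hq, h3⟩
  | case3 i h =>
    refine iff_of_false (by simp) ?_
    rintro ⟨p, q, hp, hpq, hq, _⟩
    exact h (Nat.lt_of_le_of_lt hp (Nat.lt_trans hpq hq))

lemma a_spec (xs : List Int) (k : Int) :
    get_deltas xs k = true ↔ HasClosePair xs k := by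
  unfold get_deltas HasClosePair
  rw [outer_spec]
  constructor
  · rintro ⟨p, q, _, h⟩; exact ⟨p, q, h⟩
  · rintro ⟨p, q, h⟩; exact ⟨p, q, Nat.zero_le p, h⟩

lemma adj_spec (k : Int) (s : List Int) :
    get_deltas_adj k s = true ↔ ∃ i : Nat, ∃ h : i + 1 < s.length, s[i+1] - s[i]'(Nat.lt_of_succ_lt h) ≤ k := by
  fun_induction get_deltas_adj k s with
  | case1 a b t hab =>
    refine iff_of_true rfl ?_
    exact ⟨0, by simp, by simpa using hab⟩
  | case2 a b t hab ih =>
    rw [ih]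
    constructor
    · rintro ⟨i, hi, h3⟩
      exact ⟨i + 1, by simpa using hi, by simpa using h3⟩
    · rintro ⟨i, hi, h3⟩
      cases i with
      | zero => exact absurd (by simpa using h3) hab
      | succ i => exact ⟨i, by simpa using hi, by simpa using h3⟩
  | case3 s hs =>
    refine iff_of_false (by simp) ?_
    rintro ⟨i, hi, _⟩
    match s, hs with
    | [], _ => simp at hi
    | [a], _ => simp at hi
    | a :: b :: t, hs => exact hs a b t rfl

-- permutation invariance of HasClosePair, via Pairwise of the symmetric 'far' relation
lemma hasClosePair_iff_not_pairwise (xs : List Int) (k : Int) :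
    HasClosePair xs k ↔ ¬ xs.Pairwise (fun a b => k < |a - b|) := by
  unfold HasClosePair
  rw [List.pairwise_iff_getElem]
  push Not
  constructor
  · rintro ⟨p, q, hpq, hq, h3⟩
    exact ⟨p, q, Nat.lt_trans hpq hq, hq, hpq, h3⟩
  · rintro ⟨p, q, hp, hq, hpq, h3⟩
    exact ⟨p, q, hpq, hq, h3⟩

lemma hasClosePair_perm {xs ys : List Int} (h : xs.Perm ys) (k : Int) :
    HasClosePair xs k ↔ HasClosePair ys k := by
  rw [hasClosePair_iff_not_pairwise, hasClosePair_iff_not_pairwise]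
  exact not_congr (h.pairwise_iff (by
    intro a b hab
    simpa [abs_sub_comm] using hab))

lemma b_spec (xs : List Int) (k : Int) :
    get_deltas_alt xs k = true ↔ HasClosePair xs k := by
  rw [← hasClosePair_perm (PySem.List.sorted_perm xs (fun x => x) false) k]
  unfold get_deltas_alt
  rw [adj_spec]
  constructor
  · rintro ⟨i, hi, h3⟩
    refine ⟨i, i + 1, Nat.lt_succ_self i, hi, ?_⟩
    have hle := PySem.List.sorted_id_getElem_mono (xs := xs) (Nat.le_succ i) hi
    rw [abs_sub_comm, abs_of_nonneg (sub_nonneg.mpr hle)]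
    exact h3
  · rintro ⟨p, q, hpq, hq, h3⟩
    have hq1 : p + 1 < (PySem.List.sorted xs (fun x => x) false).length :=
      Nat.lt_of_le_of_lt hpq hq
    refine ⟨p, hq1, ?_⟩
    have h1 := PySem.List.sorted_id_getElem_mono (xs := xs) hpq hq
    have habs : |(PySem.List.sorted xs (fun x => x) false)[p]'(Nat.lt_trans hpq hq) -
        (PySem.List.sorted xs (fun x => x) false)[q]| =
        (PySem.List.sorted xs (fun x => x) false)[q] -
        (PySem.List.sorted xs (fun x => x) false)[p]'(Nat.lt_trans hpq hq) := by
      rw [abs_sub_comm]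
      exact abs_of_nonneg (sub_nonneg.mpr (PySem.List.sorted_id_getElem_mono (xs := xs) (Nat.le_of_lt hpq) hq))
    rw [habs] at h3
    linarith

-- ===== VERDICT (by name: the statement is the Claim_ definition above) =====
theorem get_deltas_spec : Claim_equal_get_deltas := by
  intro xs k _
  unfold Spec_get_deltas
  by_cases h : HasClosePair xs k
  · rw [(a_spec xs k).mpr h, ((b_spec xs k).mpr h)]
  · have ha := (a_spec xs k).not
    have hb := (b_spec xs k).not
    simp only [Bool.not_eq_true] at ha hb
    rw [ha.mpr h, hb.mpr h]
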